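-- pv_equiv track=rewrite | github.com/mattdinhnguyen/algos | freqqueries.py | scheduleCourseGreedy
-- ===== SOURCE A (Python) =====
-- from heapq import heappush, heappop
-- from typing import List
--
-- def scheduleCourseGreedy(courses: List[List[int]]) -> int: # best time
--     courses.sort(key = lambda c: (c[1],c[0]))
--     daysTakenByCourses = []
--     daySpent = 0
--     for dayTaken,closedDate in courses:
--         daySpent += dayTaken
--         heappush(daysTakenByCourses,-dayTaken)
--         if daySpent > closedDate:
--             daySpent += heappop(daysTakenByCourses)
--
--     return len(daysTakenByCourses)
-- ===== SOURCE B (Python) =====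
-- def scheduleCourseGreedy(courses):  # same in-place sort of `courses` as A
--     courses.sort(key=lambda c: (c[1], c[0]))
--     taken = []  # durations of accepted courses, kept in ascending order
--     for duration, deadline in courses:
--         taken.append(duration)
--         taken.sort()
--         if sum(taken) > deadline:
--             taken.pop()  # drop the longest accepted course (last of sorted list)
--     return len(taken)
-- ===== Notes on version B (the rewrite author's own statement) =====
-- stated objective: simpler
-- what changed: Drops the negated max-heap and the running daySpent accumulator: B keeps the accepted durations as an ascending list re-sorted after each append, tests overflow with sum(taken) and drops the longest course by popping the last element.
import Mathlib
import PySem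

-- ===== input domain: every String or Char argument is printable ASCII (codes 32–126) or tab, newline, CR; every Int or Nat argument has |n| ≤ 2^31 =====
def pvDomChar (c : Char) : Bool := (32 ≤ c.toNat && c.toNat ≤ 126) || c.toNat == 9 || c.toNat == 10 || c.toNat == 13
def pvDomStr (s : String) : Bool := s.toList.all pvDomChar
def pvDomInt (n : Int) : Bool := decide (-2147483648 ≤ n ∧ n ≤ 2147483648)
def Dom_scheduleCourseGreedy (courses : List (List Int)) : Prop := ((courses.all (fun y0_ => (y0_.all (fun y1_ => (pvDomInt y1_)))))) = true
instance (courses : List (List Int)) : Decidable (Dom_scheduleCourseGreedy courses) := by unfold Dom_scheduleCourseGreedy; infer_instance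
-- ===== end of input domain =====

-- B replaces A's negated max-heap and running daySpent accumulator by an ascending list of
-- accepted durations re-sorted after each append, with sum() as overflow test and pop() of the
-- last element as the drop (simpler; same in-place sort of the `courses` argument as A).


-- ===== PORT A =====
-- heapq is modelled as a bag: heappush appends, heappop returns (and removes the first
-- occurrence of) the minimal element — exact for the popped VALUE and the heap's LENGTH,
-- which are the only observables A's return value depends on.
def goA : List (List Int) → List Int → Int → List Int
  | [], heap, _ => heap
  | c :: rest, heap, daySpent =>
    match c with
    | [dayTaken, closedDate] =>
      let daySpent' := daySpent + dayTaken
      let heap' := heap ++ [-dayTaken]                     -- heappush(daysTakenByCourses, -dayTaken)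
      if daySpent' > closedDate then
        match PySem.List.min? heap' (fun x => x) with     -- heappop returns the minimum …
        | some m => goA rest ((PySem.List.remove? heap' m).getD heap') (daySpent' + m)  -- … and removes it
        | none => goA rest heap' daySpent'                -- unreachable: heap' ≠ []
      else goA rest heap' daySpent'
    | _ => heap                                           -- tuple unpacking raises ValueError: outside Pre_

def scheduleCourseGreedy (courses : List (List Int)) : Int :=
  -- courses.sort(key=lambda c: (c[1], c[0])); c[1]/c[0] raise outside Pre_ (length-2 rows)
  ((goA (PySem.List.sorted2 courses (fun c => PySem.List.pyGetD c 1 0) (fun c => PySem.List.pyGetD c 0 0)) [] 0).length : Int)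

-- ===== PORT B =====
def goB : List (List Int) → List Int → List Int
  | [], taken => taken
  | c :: rest, taken =>
    match c with
    | [duration, deadline] =>
      let taken' := PySem.List.sorted (taken ++ [duration]) (fun x => x)  -- append; sort
      if taken'.sum > deadline then goB rest taken'.dropLast              -- taken.pop() (nonempty: just appended)
      else goB rest taken'
    | _ => taken                                          -- tuple unpacking raises ValueError: outside Pre_

def scheduleCourseGreedy_alt (courses : List (List Int)) : Int :=
  ((goB (PySem.List.sorted2 courses (fun c => PySem.List.pyGetD c 1 0) (fun c => PySem.List.pyGetD c 0 0)) []).length : Int)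

-- ===== PRECONDITION & SPEC =====
-- A raises ValueError (tuple unpacking) unless every row has exactly 2 entries.
def Pre_scheduleCourseGreedy (courses : List (List Int)) : Prop :=
  ∀ c ∈ courses, c.length = 2
instance (courses : List (List Int)) : Decidable (Pre_scheduleCourseGreedy courses) := by
  unfold Pre_scheduleCourseGreedy; infer_instance
def pvWitness_scheduleCourseGreedy : List (List Int) :=
  [[100, 200], [200, 1300], [1000, 1250], [2000, 3200]]
def Spec_scheduleCourseGreedy (courses : List (List Int)) (out : Int) : Prop := out = scheduleCourseGreedy_alt courses
instance (courses : List (List Int)) (out : Int) : Decidable (Spec_scheduleCourseGreedy courses out) := by unfold Spec_scheduleCourseGreedy; infer_instance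

-- ===== CLAIM (what is proved, stated in full; the proofs are below) =====
def Claim_equal_scheduleCourseGreedy : Prop := ∀ (courses : List (List Int)), Dom_scheduleCourseGreedy courses → Pre_scheduleCourseGreedy courses → Spec_scheduleCourseGreedy courses (scheduleCourseGreedy courses)

-- ===== LEMMAS AND PROOFS =====

-- every element of a ≤-sorted nonempty list is ≤ its last element
lemma le_getLast_of_pairwise (l : List Int) (hs : l.Pairwise (· ≤ ·)) (h : l ≠ []) :
    ∀ x ∈ l, x ≤ l.getLast h := by
  have hl : l = l.dropLast ++ [l.getLast h] := (List.dropLast_append_getLast h).symm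
  intro x hx
  rw [hl] at hx hs
  rcases List.mem_append.mp hx with hx | hx
  · exact (List.pairwise_append.mp hs).2.2 x hx _ (by simp)
  · simp only [List.mem_singleton] at hx; simp [hx]

-- the minimum of the negated bag is the negation of the last (largest) element of the sorted list
lemma min?_neg_perm (heap l : List Int) (hp : heap.Perm (l.map (fun x => -x)))
    (hs : l.Pairwise (· ≤ ·)) (hne : l ≠ []) :
    PySem.List.min? heap (fun x => x) = some (-(l.getLast hne)) := by
  have hmemL : (-(l.getLast hne)) ∈ heap :=
    hp.mem_iff.mpr (List.mem_map.mpr ⟨l.getLast hne, l.getLast_mem hne, rfl⟩)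
  obtain ⟨v, hv⟩ : ∃ v, PySem.List.min? heap (fun x => x) = some v := by
    cases h : PySem.List.min? heap (fun x => x) with
    | none =>
      have : heap = [] := (PySem.List.min?_eq_none_iff _ _).mp h
      rw [this] at hmemL; simp at hmemL
    | some v => exact ⟨v, rfl⟩
  have hv1 : v ≤ -(l.getLast hne) := PySem.List.min?_isMin hv _ hmemL
  have hv2 : -(l.getLast hne) ≤ v := by
    have hvmem : v ∈ l.map (fun x => -x) := hp.mem_iff.mp (PySem.List.min?_mem hv)
    obtain ⟨y, hy, rfl⟩ := List.mem_map.mp hvmem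
    have := le_getLast_of_pairwise l hs hne y hy
    omega
  rw [hv]; congr 1; omega

lemma go_len : ∀ (cs : List (List Int)) (heap taken : List Int) (daySpent : Int),
    (∀ c ∈ cs, c.length = 2) → taken.Pairwise (· ≤ ·) →
    heap.Perm (taken.map (fun x => -x)) → daySpent = taken.sum →
    (goA cs heap daySpent).length = (goB cs taken).length := by
  intro cs
  induction cs with
  | nil =>
    intro heap taken _ _ _ hp _
    simpa [goA, goB] using hp.length_eq
  | cons c rest ih =>
    intro heap taken daySpent hpre hs hp hd
    have hc : c.length = 2 := hpre c (by simp)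
    obtain ⟨d, cd, rfl⟩ : ∃ d cd, c = [d, cd] := by
      match c, hc with
      | [d, cd], _ => exact ⟨d, cd, rfl⟩
    have hrest : ∀ c ∈ rest, c.length = 2 := fun c hc => hpre c (by simp [hc])
    simp only [goA, goB]
    set l := PySem.List.sorted (taken ++ [d]) (fun x => x) with hldef
    have hperm : l.Perm (taken ++ [d]) := PySem.List.sorted_perm _ _ _
    have hls : l.Pairwise (· ≤ ·) := PySem.List.sorted_pairwise _ _
    have hlne : l ≠ [] := by
      intro h
      have := hperm.length_eq
      rw [h] at this; simp at this
    have hsum : l.sum = taken.sum + d := by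
      rw [hperm.sum_eq]; simp
    have hlp : (heap ++ [-d]).Perm (l.map (fun x => -x)) := by
      have h1 : (heap ++ [-d]).Perm ((taken ++ [d]).map (fun x => -x)) := by
        simpa using hp.append_right [-d]
      exact h1.trans (hperm.map _).symm
    by_cases hif : daySpent + d > cd
    · have hifB : l.sum > cd := by omega
      rw [if_pos hif, if_pos hifB]
      set L := l.getLast hlne with hLdef
      have hmemL : (-L) ∈ heap ++ [-d] :=
        hlp.mem_iff.mpr (List.mem_map.mpr ⟨L, l.getLast_mem hlne, rfl⟩)
      simp only [min?_neg_perm _ l hlp hls hlne]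
      rw [← hLdef, PySem.List.remove?_eq_some_erase _ _ hmemL]
      simp only [Option.getD_some]
      have hsplit : l = l.dropLast ++ [L] := (List.dropLast_append_getLast hlne).symm
      have herase : ((heap ++ [-d]).erase (-L)).Perm (l.dropLast.map (fun x => -x)) := by
        have hx : l.map (fun x => -x) = l.dropLast.map (fun x => -x) ++ [-L] := by
          conv_lhs => rw [hsplit]
          simp
        have h2 : ((l.map (fun x => -x)).erase (-L)).Perm (l.dropLast.map (fun x => -x)) := by
          rw [hx]
          calc ((l.dropLast.map (fun x => -x) ++ [-L]).erase (-L)).Perm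
                (((-L) :: l.dropLast.map (fun x => -x)).erase (-L)) :=
              (List.perm_append_singleton _ _).erase _
            _ = l.dropLast.map (fun x => -x) := by simp
        exact (hlp.erase _).trans h2
      have hsorted' : l.dropLast.Pairwise (· ≤ ·) := hls.sublist l.dropLast_sublist
      have hsum' : daySpent + d + (-L) = l.dropLast.sum := by
        have : l.sum = l.dropLast.sum + L := by
          conv_lhs => rw [hsplit]
          simp
        omega
      exact ih _ _ _ hrest hsorted' herase hsum'
    · have hifB : ¬ l.sum > cd := by omega
      rw [if_neg hif, if_neg hifB]
      exact ih _ _ _ hrest hls hlp (by omega)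

-- ===== VERDICT (by name: the statement is the Claim_ definition above) =====
theorem scheduleCourseGreedy_spec : Claim_equal_scheduleCourseGreedy := by
  intro courses _ hpre
  unfold Spec_scheduleCourseGreedy scheduleCourseGreedy scheduleCourseGreedy_alt
  have hpre' : ∀ c ∈ PySem.List.sorted2 courses (fun c => PySem.List.pyGetD c 1 0) (fun c => PySem.List.pyGetD c 0 0), c.length = 2 := by
    intro c hc
    exact hpre c ((PySem.List.sorted2_perm courses _ _ false).mem_iff.mp hc)
  have h := go_len _ [] [] 0 hpre' (by simp) (by simp) (by simp)
  exact_mod_cast h
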